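-- pv_equiv track=rewrite | github.com/ericklopezdev/adventofcode2025 | 09day/09_2.py | solve
-- ===== SOURCE A (Python) =====
-- directions = [(1,0), (-1,0), (0,1), (0,-1)]
--
-- def all_pairs(lst):
--     pairs = []
--     for i in range(len(lst)):
--         for j in range(i+1, len(lst)):
--             pairs.append((i, j))
--     return pairs
--
-- def solve(points):
--     rows = sorted(set(r for r, _ in points))
--     cols = sorted(set(c for _, c in points))
--     normalized_points = [(2*rows.index(r), 2*cols.index(c)) for r, c in points]
--     height = 2*len(rows) + 1
--     width = 2*len(cols) + 1
--     boundaries = set(normalized_points)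
--     for (r1,c1),(r2,c2) in zip(normalized_points, normalized_points[1:] + [normalized_points[0]]):
--         if r1 == r2:
--             for c in range(min(c1,c2), max(c1,c2)+1):
--                 boundaries.add((r1,c))
--         else:
--             for r in range(min(r1,r2), max(r1,r2)+1):
--                 boundaries.add((r,c1))
--     grid = set((r,c) for r in range(-1, height) for c in range(-1, width))
--     outside = set()
--     stack = [(-1,-1)]
--     while stack:
--         r, c = stack.pop()
--         if (r,c) in outside:
--             continue
--         outside.add((r,c))
--         for dr, dc in directions:
--             nr, nc = r+dr, c+dc
--             if (nr,nc) in grid and (nr,nc) not in boundaries: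
--                 stack.append((nr,nc))
--     inside = grid - outside
--     max_area = 0
--     for i1, i2 in all_pairs(normalized_points):
--         r1, c1 = normalized_points[i1]
--         r2, c2 = normalized_points[i2]
--         R1, R2 = min(r1,r2), max(r1,r2)
--         C1, C2 = min(c1,c2), max(c1,c2)
--         if all((r,c) in inside for r in range(R1,R2+1) for c in range(C1,C2+1)):
--             p1, p2 = points[i1], points[i2]
--             area = (abs(p1[0]-p2[0])+1) * (abs(p1[1]-p2[1])+1)
--             max_area = max(max_area, area)
--     return max_area
-- ===== SOURCE B (Python) =====
-- # B: dict-based coordinate ranks instead of repeated list.index, bounds checks instead of a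
-- # materialised grid set, and a 2D prefix-sum table of inside cells so each candidate rectangle
-- # is tested in O(1) instead of scanning all of its cells.
-- def solve(points):
--     rows = sorted(set(r for r, _ in points))
--     cols = sorted(set(c for _, c in points))
--     row_id = {r: 2 * i for i, r in enumerate(rows)}
--     col_id = {c: 2 * j for j, c in enumerate(cols)}
--     norm = [(row_id[r], col_id[c]) for r, c in points]
--     height = 2 * len(rows) + 1
--     width = 2 * len(cols) + 1
--     boundaries = set(norm)
--     for (r1, c1), (r2, c2) in zip(norm, norm[1:] + [norm[0]]):
--         if r1 == r2:
--             for c in range(min(c1, c2), max(c1, c2) + 1):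
--                 boundaries.add((r1, c))
--         else:
--             for r in range(min(r1, r2), max(r1, r2) + 1):
--                 boundaries.add((r, c1))
--     outside = set()
--     stack = [(-1, -1)]
--     while stack:
--         r, c = stack.pop()
--         if (r, c) in outside:
--             continue
--         outside.add((r, c))
--         for nr, nc in ((r + 1, c), (r - 1, c), (r, c + 1), (r, c - 1)):
--             if -1 <= nr < height and -1 <= nc < width and (nr, nc) not in boundaries:
--                 stack.append((nr, nc))
--     # P[i][j] = number of inside cells (r, c) with 0 <= r < i and 0 <= c < j
--     P = [[0] * (width + 1)]
--     for i in range(height):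
--         run = 0
--         row = [0]
--         for j in range(width):
--             if (i, j) not in outside:
--                 run += 1
--             row.append(P[i][j + 1] + run)
--         P.append(row)
--     best = 0
--     n = len(norm)
--     for i1 in range(n):
--         r1, c1 = norm[i1]
--         p1 = points[i1]
--         for i2 in range(i1 + 1, n):
--             r2, c2 = norm[i2]
--             R1, R2 = min(r1, r2), max(r1, r2)
--             C1, C2 = min(c1, c2), max(c1, c2)
--             cnt = P[R2 + 1][C2 + 1] - P[R1][C2 + 1] - P[R2 + 1][C1] + P[R1][C1]
--             if cnt == (R2 - R1 + 1) * (C2 - C1 + 1):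
--                 p2 = points[i2]
--                 area = (abs(p1[0] - p2[0]) + 1) * (abs(p1[1] - p2[1]) + 1)
--                 if area > best:
--                     best = area
--     return best
-- ===== Notes on version B (the rewrite author's own statement) =====
-- stated objective: faster
-- what changed: B replaces A's per-pair rectangle scan over all grid cells with a 2D prefix-sum table of inside cells queried in O(1) per pair, replaces the repeated list.index calls with rank dicts built once, and flood-fills with coordinate bound checks instead of a materialised grid set.
-- outside the precondition, e.g. on solve([]): A raises IndexError, B raises IndexError
import Mathlib
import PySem

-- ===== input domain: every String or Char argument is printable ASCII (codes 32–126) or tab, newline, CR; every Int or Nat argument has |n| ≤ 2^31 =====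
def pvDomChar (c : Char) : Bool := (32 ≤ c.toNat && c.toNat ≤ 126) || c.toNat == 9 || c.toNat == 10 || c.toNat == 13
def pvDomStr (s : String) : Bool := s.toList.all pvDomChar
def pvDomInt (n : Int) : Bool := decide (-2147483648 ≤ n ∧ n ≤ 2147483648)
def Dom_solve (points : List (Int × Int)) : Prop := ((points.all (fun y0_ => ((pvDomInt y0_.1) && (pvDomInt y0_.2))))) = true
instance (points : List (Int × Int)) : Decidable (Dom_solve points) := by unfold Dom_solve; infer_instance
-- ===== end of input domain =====

-- B replaces A's per-rectangle cell scan by a 2D prefix-sum table of inside cells (O(1) per pair),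
-- looks ranks up in a dict instead of list.index, and flood-fills with bound checks instead of a
-- materialised grid set.  Equivalence is about the return value; neither program mutates its input.

-- helpers shared by both ports (this code is textually identical in Source A and Source B):
-- rows = sorted(set(r for r, _ in points)) / cols = sorted(set(c for _, c in points))
def pvRows (points : List (Int × Int)) : List Int :=
  PySem.List.sorted (PySem.Set.ofList (points.map (fun p => p.1))) (fun x => x)
def pvCols (points : List (Int × Int)) : List Int :=
  PySem.List.sorted (PySem.Set.ofList (points.map (fun p => p.2))) (fun x => x)

-- the boundary-marking loop over consecutive normalized points (identical in Source A and Source B)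
def pvBoundaries (norm : List (Int × Int)) : PySem.Set (Int × Int) :=
  (norm.zip (PySem.List.slice norm (some 1) none ++ [PySem.List.pyGetD norm 0 (0, 0)])).foldl
    (fun b q =>
      if q.1.1 == q.2.1 then
        (PySem.List.pyRange (min q.1.2 q.2.2) (max q.1.2 q.2.2 + 1)).foldl
          (fun b c => PySem.Set.add b (q.1.1, c)) b
      else
        (PySem.List.pyRange (min q.1.1 q.2.1) (max q.1.1 q.2.1 + 1)).foldl
          (fun b r => PySem.Set.add b (r, q.1.2)) b)
    (PySem.Set.ofList norm)

-- ===== PORT A =====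
def pvDirections : List (Int × Int) := [(1, 0), (-1, 0), (0, 1), (0, -1)]

def allPairs {α : Type} (lst : List α) : List (Int × Int) :=
  (PySem.List.pyRange 0 (PySem.List.len lst)).foldl (fun pairs i =>
    (PySem.List.pyRange (i + 1) (PySem.List.len lst)).foldl
      (fun pairs j => pairs ++ [(i, j)]) pairs) []

-- A's normalized_points
def pvNormA (points : List (Int × Int)) : List (Int × Int) :=
  points.map (fun p =>
    (2 * (((PySem.List.index? (pvRows points) p.1).getD 0 : Nat) : Int),
     2 * (((PySem.List.index? (pvCols points) p.2).getD 0 : Nat) : Int)))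

-- A's grid = set((r,c) for r in range(-1,height) for c in range(-1,width))
def pvGrid (height width : Int) : PySem.Set (Int × Int) :=
  PySem.Set.ofList
    ((PySem.List.pyRange (-1) height).flatMap (fun r =>
      (PySem.List.pyRange (-1) width).map (fun c => (r, c))))

-- A's while-loop flood fill over a grid SET; the Lean stack keeps Python's list reversed
-- (head = top, so cons = stack.append and pattern split = stack.pop()); fuel is only a
-- totality guard for the while loop (each iteration pops one entry)
def floodA (grid boundaries : PySem.Set (Int × Int)) :
    Nat → PySem.Set (Int × Int) → List (Int × Int) → PySem.Set (Int × Int)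
  | 0, outside, _ => outside
  | _ + 1, outside, [] => outside
  | fuel + 1, outside, p :: rest =>
    if PySem.Set.contains outside p then floodA grid boundaries fuel outside rest
    else
      floodA grid boundaries fuel (PySem.Set.add outside p)
        (pvDirections.foldl (fun st d =>
          if PySem.Set.contains grid (p.1 + d.1, p.2 + d.2) &&
             !PySem.Set.contains boundaries (p.1 + d.1, p.2 + d.2) then
            (p.1 + d.1, p.2 + d.2) :: st
          else st) rest)

def solve (points : List (Int × Int)) : Int :=
  let normalized := pvNormA points
  let height := 2 * PySem.List.len (pvRows points) + 1
  let width := 2 * PySem.List.len (pvCols points) + 1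
  let boundaries := pvBoundaries normalized
  let grid := pvGrid height width
  let outside := floodA grid boundaries (5 * (height + 1) * (width + 1) + 5).toNat
    PySem.Set.empty [(-1, -1)]
  let inside := PySem.Set.diff grid outside
  (allPairs normalized).foldl (fun maxArea pr =>
    let q1 := PySem.List.pyGetD normalized pr.1 (0, 0)
    let q2 := PySem.List.pyGetD normalized pr.2 (0, 0)
    if (PySem.List.pyRange (min q1.1 q2.1) (max q1.1 q2.1 + 1)).all (fun r =>
        (PySem.List.pyRange (min q1.2 q2.2) (max q1.2 q2.2 + 1)).all (fun c =>
          PySem.Set.contains inside (r, c))) then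
      let p1 := PySem.List.pyGetD points pr.1 (0, 0)
      let p2 := PySem.List.pyGetD points pr.2 (0, 0)
      max maxArea ((|p1.1 - p2.1| + 1) * (|p1.2 - p2.2| + 1))
    else maxArea) 0

-- ===== PORT B =====
-- B's norm, through the dicts row_id / col_id built by enumerate
def pvNormB (points : List (Int × Int)) : List (Int × Int) :=
  let rowId := (PySem.List.enumerate (pvRows points)).foldl
    (fun d q => d.insert q.2 (2 * q.1)) PySem.Dict.empty
  let colId := (PySem.List.enumerate (pvCols points)).foldl
    (fun d q => d.insert q.2 (2 * q.1)) PySem.Dict.empty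
  points.map (fun p => (rowId.getD p.1 0, colId.getD p.2 0))

-- B's flood fill: no grid set, the neighbour tuple literal and bound checks instead
def floodB (height width : Int) (boundaries : PySem.Set (Int × Int)) :
    Nat → PySem.Set (Int × Int) → List (Int × Int) → PySem.Set (Int × Int)
  | 0, outside, _ => outside
  | _ + 1, outside, [] => outside
  | fuel + 1, outside, p :: rest =>
    if PySem.Set.contains outside p then floodB height width boundaries fuel outside rest
    else
      floodB height width boundaries fuel (PySem.Set.add outside p)
        ([(p.1 + 1, p.2), (p.1 - 1, p.2), (p.1, p.2 + 1), (p.1, p.2 - 1)].foldl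
          (fun st np =>
            if (-1 ≤ np.1 && np.1 < height && -1 ≤ np.2 && np.2 < width) &&
               !PySem.Set.contains boundaries np then
              np :: st
            else st) rest)

-- B's prefix table: P[i][j] = number of inside cells (r,c) with r < i, c < j
def pvPrefix (outside : PySem.Set (Int × Int)) (height width : Int) : List (List Int) :=
  (PySem.List.pyRange 0 height).foldl (fun P i =>
    P ++ [((PySem.List.pyRange 0 width).foldl (fun (s : Int × List Int) j =>
      let run := if !PySem.Set.contains outside (i, j) then s.1 + 1 else s.1
      (run, s.2 ++ [PySem.List.pyGetD (PySem.List.pyGetD P i []) (j + 1) 0 + run]))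
      ((0 : Int), [(0 : Int)])).2])
    [PySem.List.pyRepeat [(0 : Int)] (width + 1)]

def solve_alt (points : List (Int × Int)) : Int :=
  let norm := pvNormB points
  let height := 2 * PySem.List.len (pvRows points) + 1
  let width := 2 * PySem.List.len (pvCols points) + 1
  let boundaries := pvBoundaries norm
  let outside := floodB height width boundaries (5 * (height + 1) * (width + 1) + 5).toNat
    PySem.Set.empty [(-1, -1)]
  let P := pvPrefix outside height width
  let n := PySem.List.len norm
  (PySem.List.pyRange 0 n).foldl (fun best i1 =>
    let q1 := PySem.List.pyGetD norm i1 (0, 0)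
    let p1 := PySem.List.pyGetD points i1 (0, 0)
    (PySem.List.pyRange (i1 + 1) n).foldl (fun best i2 =>
      let q2 := PySem.List.pyGetD norm i2 (0, 0)
      let R1 := min q1.1 q2.1
      let R2 := max q1.1 q2.1
      let C1 := min q1.2 q2.2
      let C2 := max q1.2 q2.2
      let cnt := PySem.List.pyGetD (PySem.List.pyGetD P (R2 + 1) []) (C2 + 1) 0
        - PySem.List.pyGetD (PySem.List.pyGetD P R1 []) (C2 + 1) 0
        - PySem.List.pyGetD (PySem.List.pyGetD P (R2 + 1) []) C1 0
        + PySem.List.pyGetD (PySem.List.pyGetD P R1 []) C1 0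
      if cnt == (R2 - R1 + 1) * (C2 - C1 + 1) then
        let p2 := PySem.List.pyGetD points i2 (0, 0)
        let area := (|p1.1 - p2.1| + 1) * (|p1.2 - p2.2| + 1)
        if area > best then area else best
      else best) best) 0

-- ===== PRECONDITION & SPEC =====
-- Pre_ excludes only the empty list, on which both Pythons raise IndexError (normalized_points[0]).
def Pre_solve (points : List (Int × Int)) : Prop := points ≠ []
instance (points : List (Int × Int)) : Decidable (Pre_solve points) := by
  unfold Pre_solve; infer_instance

def pvWitness_solve : (List (Int × Int)) := [(0, 0), (0, 2), (2, 2), (2, 0)]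

def Spec_solve (points : List (Int × Int)) (out : Int) : Prop := out = solve_alt points
instance (points : List (Int × Int)) (out : Int) : Decidable (Spec_solve points out) := by
  unfold Spec_solve; infer_instance

-- ===== CLAIM (what is proved, stated in full; the proofs are below) =====
def Claim_equal_solve : Prop :=
  ∀ (points : List (Int × Int)), Dom_solve points → Pre_solve points →
    Spec_solve points (solve points)

-- ===== LEMMAS AND PROOFS =====

-- indicator / partial-sum spec for B's prefix table
def pvInd (o : PySem.Set (Int × Int)) (r c : Nat) : Int :=
  if PySem.Set.contains o ((r : Int), (c : Int)) then 0 else 1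

def pvS (o : PySem.Set (Int × Int)) (i j : Nat) : Int :=
  ∑ r ∈ Finset.range i, ∑ c ∈ Finset.range j, pvInd o r c

lemma pvS_zero_right (o : PySem.Set (Int × Int)) (i : Nat) : pvS o i 0 = 0 := by
  simp [pvS]

lemma pvS_succ_left (o : PySem.Set (Int × Int)) (i j : Nat) :
    pvS o (i + 1) j = pvS o i j + ∑ c ∈ Finset.range j, pvInd o i c := by
  simp [pvS, Finset.sum_range_succ]

lemma pv_row_inv (o : PySem.Set (Int × Int)) (W : Nat) (P : List (List Int)) (i : Nat)
    (hprev : PySem.List.pyGetD P (i : Int) [] = (List.range (W + 1)).map (fun j => pvS o i j)) :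
    ∀ m, m ≤ W →
      (List.range m).foldl (fun (s : Int × List Int) (j : Nat) =>
        let run := if !PySem.Set.contains o ((i : Int), (j : Int)) then s.1 + 1 else s.1
        (run, s.2 ++ [PySem.List.pyGetD (PySem.List.pyGetD P (i : Int) []) ((j : Int) + 1) 0 + run]))
        ((0 : Int), [(0 : Int)])
      = (∑ c ∈ Finset.range m, pvInd o i c,
         (List.range (m + 1)).map (fun j => pvS o (i + 1) j)) := by
  intro m
  induction m with
  | zero =>
    intro _
    simp [pvS_succ_left, pvS_zero_right, List.range_succ]
  | succ m ih =>
    intro hm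
    rw [List.range_succ, List.foldl_append, ih (Nat.le_of_succ_le hm)]
    simp only [List.foldl]
    have hrun : (if !PySem.Set.contains o ((i : Int), (m : Int)) then
        (∑ c ∈ Finset.range m, pvInd o i c) + 1 else (∑ c ∈ Finset.range m, pvInd o i c))
        = ∑ c ∈ Finset.range (m + 1), pvInd o i c := by
      rw [Finset.sum_range_succ]
      by_cases hmem : ((i : Int), (m : Int)) ∈ o <;> simp [pvInd, hmem]
    have hcast : ((m : Int) + 1) = ((m + 1 : Nat) : Int) := by push_cast; ring
    rw [hrun, hprev, hcast, PySem.List.pyGetD_natCast,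
      PySem.List.getD_map_range _ _ _ _ (by omega)]
    refine Prod.ext rfl ?_
    rw [List.range_succ (n := m + 1), List.map_append]
    simp only [List.map_cons, List.map_nil, List.append_cancel_left_eq, List.cons.injEq, and_true]
    rw [pvS_succ_left]

lemma pv_prefix_inv (o : PySem.Set (Int × Int)) (W : Nat) :
    ∀ m : Nat,
      (List.range m).foldl (fun P (i : Nat) =>
        P ++ [((PySem.List.pyRange 0 (W : Int)).foldl (fun (s : Int × List Int) j =>
          let run := if !PySem.Set.contains o ((i : Int), j) then s.1 + 1 else s.1
          (run, s.2 ++ [PySem.List.pyGetD (PySem.List.pyGetD P (i : Int) []) (j + 1) 0 + run]))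
          ((0 : Int), [(0 : Int)])).2])
        [PySem.List.pyRepeat [(0 : Int)] ((W : Int) + 1)]
      = (List.range (m + 1)).map (fun i => (List.range (W + 1)).map (fun j => pvS o i j)) := by
  intro m
  induction m with
  | zero =>
    simp only [List.range_zero, List.foldl_nil, Nat.zero_add, List.range_one, List.map_cons,
      List.map_nil]
    have h1 : PySem.List.pyRepeat [(0 : Int)] ((W : Int) + 1) = List.replicate (W + 1) (0 : Int) := by
      rw [PySem.List.pyRepeat_singleton]
      norm_num
    rw [h1]
    congr 1
    symm
    rw [List.eq_replicate_iff]
    refine ⟨by simp, ?_⟩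
    intro b hb
    obtain ⟨j, -, rfl⟩ := List.mem_map.mp hb
    simp [pvS]
  | succ m ih =>
    rw [List.range_succ, List.foldl_append, ih]
    simp only [List.foldl]
    have hprev : PySem.List.pyGetD
        ((List.range (m + 1)).map (fun i => (List.range (W + 1)).map (fun j => pvS o i j)))
        ((m : Nat) : Int) []
        = (List.range (W + 1)).map (fun j => pvS o m j) := by
      rw [PySem.List.pyGetD_natCast, PySem.List.getD_map_range _ _ _ _ (by omega)]
    rw [PySem.List.pyRange_zero_natCast, List.foldl_map, pv_row_inv o W _ m hprev W le_rfl,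
      List.range_succ (n := m + 1), List.map_append]
    simp

lemma pv_prefix_eq (o : PySem.Set (Int × Int)) (H W : Nat) :
    pvPrefix o (H : Int) (W : Int)
      = (List.range (H + 1)).map (fun i => (List.range (W + 1)).map (fun j => pvS o i j)) := by
  unfold pvPrefix
  have houter := PySem.List.pyRange_zero_natCast H
  rw [houter, List.foldl_map]
  exact pv_prefix_inv o W H

lemma pv_prefix_get (o : PySem.Set (Int × Int)) (H W i j : Nat) (hi : i ≤ H) (hj : j ≤ W) :
    PySem.List.pyGetD (PySem.List.pyGetD (pvPrefix o (H : Int) (W : Int)) (i : Int) []) ((j : Int)) 0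
      = pvS o i j := by
  rw [pv_prefix_eq, PySem.List.pyGetD_natCast, PySem.List.pyGetD_natCast,
    PySem.List.getD_map_range _ _ _ _ (show i < H + 1 by omega),
    PySem.List.getD_map_range _ _ _ _ (show j < W + 1 by omega)]
      

lemma pv_rows_nodup (points : List (Int × Int)) : (pvRows points).Nodup := by
  unfold pvRows
  exact (PySem.List.sorted_ofList_pairwise_lt _).imp (fun hlt => ne_of_lt hlt)

lemma pv_cols_nodup (points : List (Int × Int)) : (pvCols points).Nodup := by
  unfold pvCols
  exact (PySem.List.sorted_ofList_pairwise_lt _).imp (fun hlt => ne_of_lt hlt)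

lemma pv_dictRank (l : List Int) (hnd : l.Nodup) (r : Int) (hr : r ∈ l) :
    ((PySem.List.enumerate l).foldl (fun d q => d.insert q.2 (2 * q.1))
      (PySem.Dict.empty : PySem.Dict Int Int)).getD r 0
    = 2 * (((PySem.List.index? l r).getD 0 : Nat) : Int) := by
  obtain ⟨k, hk⟩ : ∃ k, PySem.List.index? l r = some k :=
    Option.isSome_iff_exists.mp ((PySem.List.index?_isSome_iff l r).mpr hr)
  obtain ⟨hklt, hget, -⟩ := PySem.List.getElem_of_index?_eq_some hk
  have hfresh : ∀ q ∈ PySem.List.enumerate l,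
      (PySem.Dict.empty : PySem.Dict Int Int).contains q.2 = false := by
    intro q _; simp [PySem.Dict.contains, PySem.Dict.empty]
  have hkeys : ((PySem.List.enumerate l).map (fun q => q.2)).Nodup := by
    rw [PySem.List.map_snd_enumerate]; exact hnd
  have hitems := PySem.Dict.items_foldl_insert_fresh (PySem.List.enumerate l)
    (fun q => q.2) (fun q => 2 * q.1) PySem.Dict.empty hfresh hkeys
  set d := (PySem.List.enumerate l).foldl (fun d q => d.insert q.2 (2 * q.1))
    (PySem.Dict.empty : PySem.Dict Int Int) with hd
  have henum : ((k : Int), r) ∈ PySem.List.enumerate l := by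
    rw [PySem.List.mem_enumerate_iff]
    exact ⟨k, hklt, by simp [hget]⟩
  have hmem : (r, 2 * (k : Int)) ∈ d.items := by
    rw [hitems]
    exact List.mem_append.mpr (Or.inr (List.mem_map.mpr ⟨((k : Int), r), henum, rfl⟩))
  have hkn : d.keys.Nodup := by
    have hk2 : d.keys = (d.items).map (fun q => q.1) := rfl
    rw [hk2, hitems]
    simpa [List.map_map, Function.comp_def] using hkeys
  rw [PySem.Dict.getD_of_mem_items d hmem hkn 0, hk]
  simp

lemma pv_norm_eq (points : List (Int × Int)) : pvNormA points = pvNormB points := by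
  unfold pvNormA pvNormB
  apply List.map_congr_left
  intro p hp
  have hr : p.1 ∈ pvRows points := by
    unfold pvRows; rw [PySem.List.mem_sorted, PySem.Set.mem_ofList]
    exact List.mem_map_of_mem hp
  have hc : p.2 ∈ pvCols points := by
    unfold pvCols; rw [PySem.List.mem_sorted, PySem.Set.mem_ofList]
    exact List.mem_map_of_mem hp
  rw [pv_dictRank (pvRows points) (pv_rows_nodup points) _ hr,
    pv_dictRank (pvCols points) (pv_cols_nodup points) _ hc]

lemma pv_grid_mem (h w : Int) (x : Int × Int) :
    x ∈ pvGrid h w ↔ (-1 ≤ x.1 ∧ x.1 < h ∧ -1 ≤ x.2 ∧ x.2 < w) := by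
  unfold pvGrid
  rw [PySem.Set.mem_ofList]
  simp only [List.mem_flatMap, List.mem_map, PySem.List.mem_pyRange_one]
  constructor
  · rintro ⟨r, ⟨hr1, hr2⟩, c, ⟨hc1, hc2⟩, rfl⟩
    exact ⟨hr1, hr2, hc1, hc2⟩
  · rintro ⟨h1, h2, h3, h4⟩
    exact ⟨x.1, ⟨h1, h2⟩, x.2, ⟨h3, h4⟩, rfl⟩

lemma pv_grid_contains (h w : Int) (np : Int × Int) :
    PySem.Set.contains (pvGrid h w) np
      = (-1 ≤ np.1 && np.1 < h && -1 ≤ np.2 && np.2 < w) := by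
  rw [Bool.eq_iff_iff]
  simp only [Bool.and_eq_true, decide_eq_true_eq, PySem.Set.contains_iff, pv_grid_mem]
  tauto

lemma pv_flood_eq (h w : Int) (bnd : PySem.Set (Int × Int)) :
    ∀ (fuel : Nat) (o : PySem.Set (Int × Int)) (s : List (Int × Int)),
      floodA (pvGrid h w) bnd fuel o s = floodB h w bnd fuel o s := by
  intro fuel
  induction fuel with
  | zero => intro o s; rfl
  | succ n ih =>
    intro o s
    match s with
    | [] => rfl
    | p :: rest =>
      rw [floodA, floodB]
      by_cases hvis : PySem.Set.contains o p = true
      · simp only [hvis, if_true]; exact ih o rest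
      · simp only [Bool.not_eq_true] at hvis
        simp only [hvis, Bool.false_eq_true, if_false]
        rw [ih]
        congr 1
        simp only [pvDirections, List.foldl, pv_grid_contains, add_zero, sub_eq_add_neg]
      


lemma pv_rect (o : PySem.Set (Int × Int)) (a b c d : Nat) (hab : a ≤ b) (hcd : c ≤ d) :
    pvS o b d - pvS o a d - pvS o b c + pvS o a c
      = ∑ r ∈ Finset.Ico a b, ∑ c' ∈ Finset.Ico c d, pvInd o r c' := by
  have hrow : ∀ r : Nat, ∑ c' ∈ Finset.Ico c d, pvInd o r c'
      = (∑ c' ∈ Finset.range d, pvInd o r c') - ∑ c' ∈ Finset.range c, pvInd o r c' :=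
    fun r => Finset.sum_Ico_eq_sub _ hcd
  calc pvS o b d - pvS o a d - pvS o b c + pvS o a c
      = (pvS o b d - pvS o a d) - (pvS o b c - pvS o a c) := by ring
    _ = (∑ r ∈ Finset.Ico a b, ∑ c' ∈ Finset.range d, pvInd o r c')
        - ∑ r ∈ Finset.Ico a b, ∑ c' ∈ Finset.range c, pvInd o r c' := by
        rw [Finset.sum_Ico_eq_sub _ hab, Finset.sum_Ico_eq_sub _ hab]; rfl
    _ = ∑ r ∈ Finset.Ico a b, ((∑ c' ∈ Finset.range d, pvInd o r c')
        - ∑ c' ∈ Finset.range c, pvInd o r c') := (Finset.sum_sub_distrib _ _).symm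
    _ = ∑ r ∈ Finset.Ico a b, ∑ c' ∈ Finset.Ico c d, pvInd o r c' := by
        exact Finset.sum_congr rfl (fun r _ => (hrow r).symm)

lemma pv_cnt_iff (o : PySem.Set (Int × Int)) (a b c d : Nat) (hab : a ≤ b) (hcd : c ≤ d) :
    (pvS o b d - pvS o a d - pvS o b c + pvS o a c
        = ((b - a : Nat) : Int) * ((d - c : Nat) : Int))
    ↔ ∀ r ∈ Finset.Ico a b, ∀ c' ∈ Finset.Ico c d,
        PySem.Set.contains o ((r : Int), (c' : Int)) = false := by
  rw [pv_rect o a b c d hab hcd]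
  rw [← Finset.sum_product' (Finset.Ico a b) (Finset.Ico c d) (fun r c' => pvInd o r c')]
  set T := Finset.Ico a b ×ˢ Finset.Ico c d with hT
  have hcard : ((T.card : Int)) = ((b - a : Nat) : Int) * ((d - c : Nat) : Int) := by
    rw [hT, Finset.card_product, Nat.card_Ico, Nat.card_Ico]
    push_cast
    ring
  have hle : ∀ p ∈ T, 0 ≤ 1 - pvInd o p.1 p.2 := by
    intro p _
    unfold pvInd
    split <;> norm_num
  have hkey : (∑ p ∈ T, (1 - pvInd o p.1 p.2)) = (T.card : Int) - ∑ p ∈ T, pvInd o p.1 p.2 := by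
    rw [Finset.sum_sub_distrib]
    simp [mul_comm]
  constructor
  · intro hsum r hr c' hc'
    have hz := (Finset.sum_eq_zero_iff_of_nonneg hle).mp (by rw [hkey, hsum, hcard]; ring)
    have := hz (r, c') (by rw [hT]; exact Finset.mem_product.mpr ⟨hr, hc'⟩)
    unfold pvInd at this
    split at this
    · next hcon => omega
    · next hcon => simpa using hcon
  · intro hall
    have : ∀ p ∈ T, pvInd o p.1 p.2 = 1 := by
      intro p hp
      have hmem := Finset.mem_product.mp (by rw [hT] at hp; exact hp)
      have hf := hall p.1 hmem.1 p.2 hmem.2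
      unfold pvInd
      rw [hf]
      simp
    rw [Finset.sum_congr rfl this, Finset.sum_const, nsmul_eq_mul, mul_one, hcard]
      

lemma pv_cond_iff (o : PySem.Set (Int × Int)) (H W : Nat) (R1 R2 C1 C2 : Int)
    (hR1 : 0 ≤ R1) (hR12 : R1 ≤ R2) (hR2 : R2 + 3 ≤ (H : Int))
    (hC1 : 0 ≤ C1) (hC12 : C1 ≤ C2) (hC2 : C2 + 3 ≤ (W : Int)) :
    ((PySem.List.pyRange R1 (R2 + 1)).all (fun r =>
       (PySem.List.pyRange C1 (C2 + 1)).all (fun c =>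
         PySem.Set.contains (PySem.Set.diff (pvGrid (H : Int) (W : Int)) o) (r, c))) = true)
    ↔ (PySem.List.pyGetD (PySem.List.pyGetD (pvPrefix o (H : Int) (W : Int)) (R2 + 1) []) (C2 + 1) 0
        - PySem.List.pyGetD (PySem.List.pyGetD (pvPrefix o (H : Int) (W : Int)) R1 []) (C2 + 1) 0
        - PySem.List.pyGetD (PySem.List.pyGetD (pvPrefix o (H : Int) (W : Int)) (R2 + 1) []) C1 0
        + PySem.List.pyGetD (PySem.List.pyGetD (pvPrefix o (H : Int) (W : Int)) R1 []) C1 0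
        = (R2 - R1 + 1) * (C2 - C1 + 1)) := by
  -- name the Nat bounds
  obtain ⟨a, rfl⟩ : ∃ a : Nat, R1 = (a : Int) := ⟨R1.toNat, (Int.toNat_of_nonneg hR1).symm⟩
  obtain ⟨b, hb⟩ : ∃ b : Nat, R2 + 1 = (b : Int) := ⟨(R2 + 1).toNat, (Int.toNat_of_nonneg (by omega)).symm⟩
  obtain ⟨c, rfl⟩ : ∃ c : Nat, C1 = (c : Int) := ⟨C1.toNat, (Int.toNat_of_nonneg hC1).symm⟩
  obtain ⟨d, hd⟩ : ∃ d : Nat, C2 + 1 = (d : Int) := ⟨(C2 + 1).toNat, (Int.toNat_of_nonneg (by omega)).symm⟩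
  have hab : a ≤ b := by omega
  have hcd : c ≤ d := by omega
  have hbH : b ≤ H := by omega
  have hdW : d ≤ W := by omega
  rw [hb, hd,
    pv_prefix_get o H W b d hbH hdW,
    pv_prefix_get o H W a d (by omega) hdW,
    pv_prefix_get o H W b c hbH (by omega),
    pv_prefix_get o H W a c (by omega) (by omega)]
  have harea : (R2 - (a : Int) + 1) * (C2 - (c : Int) + 1)
      = ((b - a : Nat) : Int) * ((d - c : Nat) : Int) := by
    push_cast [Nat.cast_sub hab, Nat.cast_sub hcd]
    rw [show R2 - (a : Int) + 1 = (b : Int) - (a : Int) by omega,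
      show C2 - (c : Int) + 1 = (d : Int) - (c : Int) by omega]
  rw [harea, pv_cnt_iff o a b c d hab hcd]
  simp only [List.all_eq_true, PySem.List.mem_pyRange_one, and_imp]
  constructor
  · intro hA r hr c' hc'
    obtain ⟨hr1, hr2⟩ := Finset.mem_Ico.mp hr
    obtain ⟨hc'1, hc'2⟩ := Finset.mem_Ico.mp hc'
    have h1 := hA (r : Int) (by exact_mod_cast hr1) (by omega)
      (c' : Int) (by exact_mod_cast hc'1) (by omega)
    rw [PySem.Set.contains_iff, PySem.Set.mem_diff] at h1
    rw [Bool.eq_false_iff, Ne, PySem.Set.contains_iff]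
    exact h1.2
  · intro hB r hra hrb c' hc'a hc'b
    rw [PySem.Set.contains_iff, PySem.Set.mem_diff, pv_grid_mem]
    refine ⟨⟨by omega, by omega, by omega, by omega⟩, ?_⟩
    have hmem1 : r.toNat ∈ Finset.Ico a b := Finset.mem_Ico.mpr ⟨by omega, by omega⟩
    have hmem2 : c'.toNat ∈ Finset.Ico c d := Finset.mem_Ico.mpr ⟨by omega, by omega⟩
    have hf := hB r.toNat hmem1 c'.toNat hmem2
    rw [Bool.eq_false_iff, Ne, PySem.Set.contains_iff] at hf
    have hcast : ((r.toNat : Int), (c'.toNat : Int)) = (r, c') := by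
      rw [Int.toNat_of_nonneg (by omega), Int.toNat_of_nonneg (by omega)]
    rw [← hcast]
    exact hf
      

lemma pv_norm_bounds (points : List (Int × Int)) (q : Int × Int) (hq : q ∈ pvNormA points) :
    0 ≤ q.1 ∧ q.1 + 3 ≤ 2 * ((pvRows points).length : Int) + 1 ∧
    0 ≤ q.2 ∧ q.2 + 3 ≤ 2 * ((pvCols points).length : Int) + 1 := by
  obtain ⟨p, hp, rfl⟩ := List.mem_map.mp hq
  have hr : p.1 ∈ pvRows points := by
    unfold pvRows; rw [PySem.List.mem_sorted, PySem.Set.mem_ofList]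
    exact List.mem_map_of_mem hp
  have hc : p.2 ∈ pvCols points := by
    unfold pvCols; rw [PySem.List.mem_sorted, PySem.Set.mem_ofList]
    exact List.mem_map_of_mem hp
  obtain ⟨k1, hk1⟩ : ∃ k, PySem.List.index? (pvRows points) p.1 = some k :=
    Option.isSome_iff_exists.mp ((PySem.List.index?_isSome_iff _ _).mpr hr)
  obtain ⟨k2, hk2⟩ : ∃ k, PySem.List.index? (pvCols points) p.2 = some k :=
    Option.isSome_iff_exists.mp ((PySem.List.index?_isSome_iff _ _).mpr hc)
  obtain ⟨hk1lt, -, -⟩ := PySem.List.getElem_of_index?_eq_some hk1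
  obtain ⟨hk2lt, -, -⟩ := PySem.List.getElem_of_index?_eq_some hk2
  simp only [hk1, hk2, Option.getD_some]
  refine ⟨by positivity, ?_, by positivity, ?_⟩ <;> omega

lemma pv_allPairs_eq {α : Type} (lst : List α) :
    allPairs lst = (PySem.List.pyRange 0 (PySem.List.len lst)).flatMap (fun i =>
      (PySem.List.pyRange (i + 1) (PySem.List.len lst)).map (fun j => (i, j))) := by
  unfold allPairs
  simp only [PySem.List.foldl_append_singleton_eq_map]
  rw [PySem.List.foldl_append_eq_flatMap]
  simp
      
-- ===== VERDICT (by name: the statement is the Claim_ definition above) =====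
theorem solve_spec : Claim_equal_solve := by
  unfold Claim_equal_solve
  intro points hdom hpre
  unfold Spec_solve solve solve_alt
  dsimp only
  rw [← pv_norm_eq points]
  have hH : (2 * PySem.List.len (pvRows points) + 1 : Int)
      = ((2 * (pvRows points).length + 1 : Nat) : Int) := by
    rw [PySem.List.len_eq]; push_cast; ring
  have hW : (2 * PySem.List.len (pvCols points) + 1 : Int)
      = ((2 * (pvCols points).length + 1 : Nat) : Int) := by
    rw [PySem.List.len_eq]; push_cast; ring
  rw [hH, hW, ← pv_flood_eq]
  rw [pv_allPairs_eq, List.flatMap_def, List.foldl_flatten, List.foldl_map]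
  apply PySem.List.foldl_congr_mem
  intro acc i1 hi1
  rw [List.foldl_map]
  apply PySem.List.foldl_congr_mem
  intro acc2 i2 hi2
  dsimp only
  set N := pvNormA points with hN
  set H := 2 * (pvRows points).length + 1 with hHn
  set W := 2 * (pvCols points).length + 1 with hWn
  set o := floodA (pvGrid (H : Int) (W : Int)) (pvBoundaries N)
    (5 * ((H : Int) + 1) * ((W : Int) + 1) + 5).toNat PySem.Set.empty [(-1, -1)] with ho
  rw [PySem.List.mem_pyRange_one] at hi1 hi2
  have hlen : PySem.List.len N = (N.length : Int) := PySem.List.len_eq N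
  have hlen2 : N.length = points.length := by rw [hN]; unfold pvNormA; exact List.length_map ..
  have hq1mem : PySem.List.pyGetD N i1 (0, 0) ∈ N :=
    PySem.List.pyGetD_mem N (0, 0) (by unfold PySem.Raise.InRange; omega)
  have hq2mem : PySem.List.pyGetD N i2 (0, 0) ∈ N :=
    PySem.List.pyGetD_mem N (0, 0) (by unfold PySem.Raise.InRange; omega)
  obtain ⟨hb1a, hb1b, hb1c, hb1d⟩ := pv_norm_bounds points _ hq1mem
  obtain ⟨hb2a, hb2b, hb2c, hb2d⟩ := pv_norm_bounds points _ hq2mem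
  set q1 := PySem.List.pyGetD N i1 (0, 0) with hq1
  set q2 := PySem.List.pyGetD N i2 (0, 0) with hq2
  have hcond := pv_cond_iff o H W (min q1.1 q2.1) (max q1.1 q2.1) (min q1.2 q2.2) (max q1.2 q2.2)
    (by omega) (by omega) (by omega) (by omega) (by omega) (by omega)
  have hbool : ((PySem.List.pyRange (min q1.1 q2.1) (max q1.1 q2.1 + 1)).all fun r =>
      (PySem.List.pyRange (min q1.2 q2.2) (max q1.2 q2.2 + 1)).all fun c =>
        PySem.Set.contains (PySem.Set.diff (pvGrid (H : Int) (W : Int)) o) (r, c))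
      = (PySem.List.pyGetD (PySem.List.pyGetD (pvPrefix o (H : Int) (W : Int)) (max q1.1 q2.1 + 1) []) (max q1.2 q2.2 + 1) 0
        - PySem.List.pyGetD (PySem.List.pyGetD (pvPrefix o (H : Int) (W : Int)) (min q1.1 q2.1) []) (max q1.2 q2.2 + 1) 0
        - PySem.List.pyGetD (PySem.List.pyGetD (pvPrefix o (H : Int) (W : Int)) (max q1.1 q2.1 + 1) []) (min q1.2 q2.2) 0
        + PySem.List.pyGetD (PySem.List.pyGetD (pvPrefix o (H : Int) (W : Int)) (min q1.1 q2.1) []) (min q1.2 q2.2) 0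
        == (max q1.1 q2.1 - min q1.1 q2.1 + 1) * (max q1.2 q2.2 - min q1.2 q2.2 + 1)) := by
    rw [Bool.eq_iff_iff, beq_iff_eq]
    exact hcond
  rw [hbool]
  by_cases hcase : (PySem.List.pyGetD (PySem.List.pyGetD (pvPrefix o (H : Int) (W : Int)) (max q1.1 q2.1 + 1) []) (max q1.2 q2.2 + 1) 0
        - PySem.List.pyGetD (PySem.List.pyGetD (pvPrefix o (H : Int) (W : Int)) (min q1.1 q2.1) []) (max q1.2 q2.2 + 1) 0
        - PySem.List.pyGetD (PySem.List.pyGetD (pvPrefix o (H : Int) (W : Int)) (max q1.1 q2.1 + 1) []) (min q1.2 q2.2) 0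
        + PySem.List.pyGetD (PySem.List.pyGetD (pvPrefix o (H : Int) (W : Int)) (min q1.1 q2.1) []) (min q1.2 q2.2) 0
        == (max q1.1 q2.1 - min q1.1 q2.1 + 1) * (max q1.2 q2.2 - min q1.2 q2.2 + 1)) = true
  · rw [if_pos hcase, if_pos hcase]
    rw [max_def]
    split_ifs <;> omega
  · rw [if_neg hcase, if_neg hcase]
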